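-- pv_equiv track=rewrite | github.com/kev-cam/ldx | python/ldx_accel_scan.py | gen_reference_program
-- ===== SOURCE A (Python) =====
-- def gen_test_vectors(params):
--     """Generate test vectors for each parameter.
--     params: list of (name, width, signed) from c2v."""
--     def vals_for_width(width):
--         if width <= 8:
--             return [0, 1, 127, 255]
--         if width <= 16:
--             return [0, 1, 1000, 0xFFFF]
--         if width <= 32:
--             return [0, 1, 42, 0xDEADBEEF, 0x7FFFFFFF]
--         return [0, 1, 42, 0xDEADBEEFCAFE]
--
--     vectors = []
--     param_vals = [vals_for_width(w)[:3] for _, w, _ in params]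
--
--     def gen(idx, combo):
--         if idx == len(params):
--             vectors.append(list(combo))
--             return
--         for v in param_vals[idx]:
--             gen(idx + 1, combo + [v])
--
--     gen(0, [])
--     return vectors
--
-- def width_to_ctype(width, signed):
--     """Convert bit width to C type string."""
--     if signed:
--         if width <= 8: return "int8_t"
--         if width <= 16: return "int16_t"
--         if width <= 32: return "int32_t"
--         return "int64_t"
--     else:
--         if width <= 8: return "uint8_t"
--         if width <= 16: return "uint16_t"
--         if width <= 32: return "uint32_t"
--         return "uint64_t"
--
-- def gen_reference_program(source_file, func_name, params, ret_width):
--     """Generate a C program that prints reference results for test vectors.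
--     params: list of (name, width, signed) from c2v."""
--     lines = []
--     lines.append('#include <stdio.h>')
--     lines.append('#include <stdint.h>')
--
--     param_types = ", ".join(width_to_ctype(w, s) for _, w, s in params)
--     ret_type = width_to_ctype(ret_width, False)
--     lines.append(f'extern {ret_type} {func_name}({param_types});')
--     lines.append('')
--     lines.append('int main() {')
--
--     # Use 16-hex-digit format for 64-bit returns, 8 for 32-bit
--     fmt = "%016llx" if ret_width > 32 else "%08llx"
--     vectors = gen_test_vectors(params)
--     for vec in vectors:
--         args = ", ".join(f"({width_to_ctype(w, s)}){v}ULL" for (_, w, s), v in zip(params, vec))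
--         lines.append(f'    printf("{fmt}\\n", (unsigned long long){func_name}({args}));')
--
--     lines.append('    return 0;')
--     lines.append('}')
--     return '\n'.join(lines)
-- ===== SOURCE B (Python) =====
-- def gen_reference_program(source_file, func_name, params, ret_width):
--     """Generate a C program that prints reference results for test vectors.
--     params: list of (name, width, signed) from c2v."""
--     def ctype(width, signed):
--         base = "int" if signed else "uint"
--         if width <= 8:
--             return base + "8_t"
--         if width <= 16:
--             return base + "16_t"
--         if width <= 32:
--             return base + "32_t"
--         return base + "64_t"
--
--     def small_vals(width):
--         if width <= 8:
--             return [0, 1, 127]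
--         if width <= 16:
--             return [0, 1, 1000]
--         return [0, 1, 42]
--
--     # iterative Cartesian product (lexicographic, like itertools.product)
--     vectors = [[]]
--     for _, w, _ in params:
--         vals = small_vals(w)
--         vectors = [vec + [v] for vec in vectors for v in vals]
--
--     fmt = "%016llx" if ret_width > 32 else "%08llx"
--     header = (
--         "#include <stdio.h>\n#include <stdint.h>\n"
--         + "extern " + ctype(ret_width, False) + " " + func_name + "("
--         + ", ".join(ctype(w, s) for _, w, s in params)
--         + ");\n\nint main() {\n"
--     )
--     body = "".join(
--         '    printf("' + fmt + '\\n", (unsigned long long)' + func_name + "("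
--         + ", ".join("(" + ctype(w, s) + ")" + str(v) + "ULL" for (_, w, s), v in zip(params, vec))
--         + "));\n"
--         for vec in vectors
--     )
--     return header + body + "    return 0;\n}"
-- ===== Notes on version B (the rewrite author's own statement) =====
-- stated objective: simpler
-- what changed: Replaces the recursive backtracking test-vector generator with an iterative Cartesian-product fold and emits the C text as one direct concatenation instead of appending to a line list joined at the end.
import Mathlib
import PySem

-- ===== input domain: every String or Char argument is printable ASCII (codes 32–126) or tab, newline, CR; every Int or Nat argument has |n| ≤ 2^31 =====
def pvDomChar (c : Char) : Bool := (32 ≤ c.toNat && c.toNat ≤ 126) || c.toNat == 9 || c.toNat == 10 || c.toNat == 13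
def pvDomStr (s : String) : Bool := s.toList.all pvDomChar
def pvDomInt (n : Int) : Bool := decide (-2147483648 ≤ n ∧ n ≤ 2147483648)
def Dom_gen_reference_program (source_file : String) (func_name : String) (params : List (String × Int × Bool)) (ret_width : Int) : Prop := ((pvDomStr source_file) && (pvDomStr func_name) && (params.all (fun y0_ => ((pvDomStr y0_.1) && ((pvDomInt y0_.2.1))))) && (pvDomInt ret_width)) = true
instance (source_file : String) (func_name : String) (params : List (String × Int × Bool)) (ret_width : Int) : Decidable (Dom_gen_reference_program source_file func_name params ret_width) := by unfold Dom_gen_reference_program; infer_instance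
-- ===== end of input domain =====

-- B replaces A's recursive test-vector generator by an iterative Cartesian-product fold and
-- builds the program text directly instead of through a joined line list (objective: simpler).

-- ===== PORT A =====
def pvA_valsForWidth (width : Int) : List Int :=
  if width ≤ 8 then [0, 1, 127, 255]
  else if width ≤ 16 then [0, 1, 1000, 65535]
  else if width ≤ 32 then [0, 1, 42, 3735928559, 2147483647]
  else [0, 1, 42, 244837814107902]

-- inner recursive 'gen': walks the remaining per-parameter value lists, appending each finished combo
def pvA_gen : List (List Int) → List Int → List (List Int) → List (List Int)
  | [], combo, vectors => vectors ++ [combo]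
  | vals :: rest, combo, vectors =>
      vals.foldl (fun vecs v => pvA_gen rest (combo ++ [v]) vecs) vectors

def pvA_genTestVectors (params : List (String × Int × Bool)) : List (List Int) :=
  -- vals_for_width(w)[:3] — PySem.List.slice is exact for the [:3] slice
  pvA_gen (params.map (fun p => PySem.List.slice (pvA_valsForWidth p.2.1) none (some 3))) [] []

def pvA_widthToCtype (width : Int) (signed : Bool) : String :=
  if signed then
    if width ≤ 8 then "int8_t"
    else if width ≤ 16 then "int16_t"
    else if width ≤ 32 then "int32_t"
    else "int64_t"
  else
    if width ≤ 8 then "uint8_t"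
    else if width ≤ 16 then "uint16_t"
    else if width ≤ 32 then "uint32_t"
    else "uint64_t"

-- the printf line appended for one vector (the body of A's for-loop)
def pvA_line (func_name fmt : String) (params : List (String × Int × Bool)) (vec : List Int) : String :=
  let args := PySem.Str.join ", " ((params.zip vec).map
    (fun pv => "(" ++ pvA_widthToCtype pv.1.2.1 pv.1.2.2 ++ ")" ++ PySem.Int.toStr pv.2 ++ "ULL"))
  "    printf(\"" ++ fmt ++ "\\n\", (unsigned long long)" ++ func_name ++ "(" ++ args ++ "));"

def gen_reference_program (source_file : String) (func_name : String) (params : List (String × Int × Bool)) (ret_width : Int) : String :=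
  let lines : List String := []
  let lines := lines ++ ["#include <stdio.h>"]
  let lines := lines ++ ["#include <stdint.h>"]
  let param_types := PySem.Str.join ", " (params.map (fun p => pvA_widthToCtype p.2.1 p.2.2))
  let ret_type := pvA_widthToCtype ret_width false
  let lines := lines ++ ["extern " ++ ret_type ++ " " ++ func_name ++ "(" ++ param_types ++ ");"]
  let lines := lines ++ [""]
  let lines := lines ++ ["int main() {"]
  let fmt := if ret_width > 32 then "%016llx" else "%08llx"
  let vectors := pvA_genTestVectors params
  let lines := vectors.foldl (fun lines vec => lines ++ [pvA_line func_name fmt params vec]) lines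
  let lines := lines ++ ["    return 0;"]
  let lines := lines ++ ["}"]
  PySem.Str.join "\n" lines

-- ===== PORT B =====
def pvB_ctype (width : Int) (signed : Bool) : String :=
  let base := if signed then "int" else "uint"
  if width ≤ 8 then base ++ "8_t"
  else if width ≤ 16 then base ++ "16_t"
  else if width ≤ 32 then base ++ "32_t"
  else base ++ "64_t"

def pvB_smallVals (width : Int) : List Int :=
  if width ≤ 8 then [0, 1, 127]
  else if width ≤ 16 then [0, 1, 1000]
  else [0, 1, 42]

-- one printf line of the body (the element of B's generator expression)
def pvB_line (func_name fmt : String) (params : List (String × Int × Bool)) (vec : List Int) : String :=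
  "    printf(\"" ++ fmt ++ "\\n\", (unsigned long long)" ++ func_name ++ "("
    ++ PySem.Str.join ", " ((params.zip vec).map
        (fun pv => "(" ++ pvB_ctype pv.1.2.1 pv.1.2.2 ++ ")" ++ PySem.Int.toStr pv.2 ++ "ULL"))
    ++ "));\n"

def gen_reference_program_alt (source_file : String) (func_name : String) (params : List (String × Int × Bool)) (ret_width : Int) : String :=
  let vectors := params.foldl
    (fun vectors p => vectors.flatMap (fun vec => (pvB_smallVals p.2.1).map (fun v => vec ++ [v])))
    [([] : List Int)]
  let fmt := if ret_width > 32 then "%016llx" else "%08llx"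
  let header := "#include <stdio.h>\n#include <stdint.h>\n"
    ++ "extern " ++ pvB_ctype ret_width false ++ " " ++ func_name ++ "("
    ++ PySem.Str.join ", " (params.map (fun p => pvB_ctype p.2.1 p.2.2))
    ++ ");\n\nint main() {\n"
  let body := PySem.Str.join "" (vectors.map (pvB_line func_name fmt params))
  header ++ body ++ "    return 0;\n}"

-- ===== PRECONDITION & SPEC =====
def Spec_gen_reference_program (source_file : String) (func_name : String) (params : List (String × Int × Bool)) (ret_width : Int) (out : String) : Prop := out = gen_reference_program_alt source_file func_name params ret_width
instance (source_file : String) (func_name : String) (params : List (String × Int × Bool)) (ret_width : Int) (out : String) : Decidable (Spec_gen_reference_program source_file func_name params ret_width out) := by unfold Spec_gen_reference_program; infer_instance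

-- ===== CLAIM (what is proved, stated in full; the proofs are below) =====
def Claim_equal_gen_reference_program : Prop := ∀ (source_file : String) (func_name : String) (params : List (String × Int × Bool)) (ret_width : Int), Dom_gen_reference_program source_file func_name params ret_width → Spec_gen_reference_program source_file func_name params ret_width (gen_reference_program source_file func_name params ret_width)

-- ===== LEMMAS AND PROOFS =====

-- both ctype tables agree
theorem pvB_ctype_eq (w : Int) (s : Bool) : pvB_ctype w s = pvA_widthToCtype w s := by
  cases s <;> unfold pvB_ctype pvA_widthToCtype <;> split_ifs <;> rfl

-- small_vals is exactly vals_for_width(w)[:3]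
theorem pvB_smallVals_eq (w : Int) :
    pvB_smallVals w = PySem.List.slice (pvA_valsForWidth w) none (some 3) := by
  unfold pvB_smallVals pvA_valsForWidth <;> split_ifs <;> rfl

-- reference Cartesian product (head-first), used only to relate the two enumerations
def pvProdR : List (List Int) → List (List Int)
  | [] => [[]]
  | vals :: rest => vals.flatMap (fun v => (pvProdR rest).map (fun t => v :: t))

theorem pvA_gen_eq (pvs : List (List Int)) :
    ∀ (combo : List Int) (vectors : List (List Int)),
      pvA_gen pvs combo vectors = vectors ++ (pvProdR pvs).map (fun t => combo ++ t) := by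
  induction pvs with
  | nil => intro combo vectors; simp [pvA_gen, pvProdR]
  | cons vals rest IH =>
    intro combo vectors
    show vals.foldl (fun vecs v => pvA_gen rest (combo ++ [v]) vecs) vectors = _
    have h : ∀ (vs : List Int) (acc : List (List Int)),
        vs.foldl (fun vecs v => pvA_gen rest (combo ++ [v]) vecs) acc
          = acc ++ vs.flatMap (fun v => (pvProdR rest).map (fun t => (combo ++ [v]) ++ t)) := by
      intro vs
      induction vs with
      | nil => intro acc; simp
      | cons v vs ih => intro acc; simp [IH, ih, List.append_assoc, List.flatMap_def]
    rw [h]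
    simp [pvProdR, List.map_flatMap, List.map_map, Function.comp_def, List.append_assoc]

theorem pvB_fold_eq (pvs : List (List Int)) :
    ∀ (vecs : List (List Int)),
      pvs.foldl (fun vecs vals => vecs.flatMap (fun vec => vals.map (fun v => vec ++ [v]))) vecs
        = vecs.flatMap (fun vec => (pvProdR pvs).map (fun t => vec ++ t)) := by
  induction pvs with
  | nil => intro vecs; simp [pvProdR]
  | cons vals rest IH =>
    intro vecs
    rw [List.foldl_cons, IH]
    simp [pvProdR, List.flatMap_map, List.map_flatMap, List.map_map, Function.comp_def,
      List.flatMap_assoc, List.append_assoc]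

-- the two vector enumerations coincide
theorem pvVectors_eq (params : List (String × Int × Bool)) :
    params.foldl
        (fun vectors p => vectors.flatMap (fun vec => (pvB_smallVals p.2.1).map (fun v => vec ++ [v])))
        [([] : List Int)]
      = pvA_genTestVectors params := by
  have hmap :
      params.foldl
          (fun vectors p => vectors.flatMap (fun vec => (pvB_smallVals p.2.1).map (fun v => vec ++ [v])))
          [([] : List Int)]
        = (params.map (fun p => pvB_smallVals p.2.1)).foldl
            (fun vecs vals => vecs.flatMap (fun vec => vals.map (fun v => vec ++ [v])))
            [([] : List Int)] := by
    rw [List.foldl_map]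
  rw [hmap, pvB_fold_eq]
  unfold pvA_genTestVectors
  rw [pvA_gen_eq]
  simp [pvB_smallVals_eq]

-- String.toList is injective
theorem pvStr_eq_of_toList {s t : String} (h : s.toList = t.toList) : s = t := by
  exact String.toList_injective h

theorem pvJoin_empty_cons (a : String) (rest : List String) :
    PySem.Str.join "" (a :: rest) = a ++ PySem.Str.join "" rest := by
  apply pvStr_eq_of_toList
  cases rest with
  | nil => simp [PySem.Str.toList_join, PySem.Chars.join_singleton, PySem.Chars.join_nil]
  | cons b rs => simp [PySem.Str.toList_join, PySem.Chars.join_cons_cons]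

theorem pvJoin_cons_of_ne_nil (sep a : String) (rest : List String) (h : rest ≠ []) :
    PySem.Str.join sep (a :: rest) = a ++ sep ++ PySem.Str.join sep rest := by
  cases rest with
  | nil => exact absurd rfl h
  | cons b rs =>
    apply pvStr_eq_of_toList
    simp [PySem.Str.toList_join, PySem.Chars.join_cons_cons]

-- '\n'.join of the printf lines plus the fixed tail, as one flat concatenation
theorem pvJoin_tail (ls : List String) :
    PySem.Str.join "\n" (ls ++ ["    return 0;", "}"])
      = PySem.Str.join "" (ls.map (· ++ "\n")) ++ "    return 0;\n}" := by
  induction ls with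
  | nil => rfl
  | cons a ls IH =>
    rw [List.cons_append, pvJoin_cons_of_ne_nil _ _ _ (by simp), IH, List.map_cons,
      pvJoin_empty_cons]
    simp [String.append_assoc]

-- one printf line of B is A's line plus its newline
theorem pvLine_eq (fn fmt : String) (params : List (String × Int × Bool)) :
    pvB_line fn fmt params = fun vec => pvA_line fn fmt params vec ++ "\n" := by
  funext vec
  unfold pvB_line pvA_line
  simp [pvB_ctype_eq, String.append_assoc]

theorem pvAB (source_file func_name : String) (params : List (String × Int × Bool)) (ret_width : Int) :
    gen_reference_program source_file func_name params ret_width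
      = gen_reference_program_alt source_file func_name params ret_width := by
  unfold gen_reference_program gen_reference_program_alt
  simp only [pvVectors_eq, PySem.List.foldl_append_singleton_eq_map, List.nil_append,
    List.cons_append, List.append_assoc, List.singleton_append]
  rw [pvJoin_cons_of_ne_nil _ _ _ (by simp), pvJoin_cons_of_ne_nil _ _ _ (by simp),
    pvJoin_cons_of_ne_nil _ _ _ (by simp), pvJoin_cons_of_ne_nil _ _ _ (by simp),
    pvJoin_cons_of_ne_nil _ _ _ (by simp)]
  rw [pvJoin_tail]
  simp only [List.map_map, Function.comp_def, pvLine_eq, pvB_ctype_eq, String.append_assoc]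
  rfl

-- ===== VERDICT (by name: the statement is the Claim_ definition above) =====
theorem gen_reference_program_spec : Claim_equal_gen_reference_program := by
  intro source_file func_name params ret_width _
  unfold Spec_gen_reference_program
  exact pvAB source_file func_name params ret_width
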